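-- pv_equiv track=rewrite | github.com/jplanetx/Assistant | eisenhower_manager.py | categorize_eisenhower
-- ===== SOURCE A (Python) =====
-- def categorize_eisenhower(tasks):
--     """Categorize tasks using Eisenhower Matrix"""
--     matrix = {
--         'urgent_important': [],      # Do First
--         'not_urgent_important': [],  # Schedule
--         'urgent_not_important': [],  # Delegate
--         'not_urgent_not_important': [] # Eliminate
--     }
--
--     for task in tasks:
--         # Default to medium if not specified
--         importance = task.get('importance', 'medium').lower()
--         urgency = task.get('urgency', 'medium').lower()
--
--         is_important = importance in ['high', 'important', 'yes']
--         is_urgent = urgency in ['high', 'urgent', 'yes']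
--
--         if is_important and is_urgent:
--             matrix['urgent_important'].append(task)
--         elif is_important:
--             matrix['not_urgent_important'].append(task)
--         elif is_urgent:
--             matrix['urgent_not_important'].append(task)
--         else:
--             matrix['not_urgent_not_important'].append(task)
--
--     return matrix
-- ===== SOURCE B (Python) =====
-- def categorize_eisenhower(tasks):
--     """Categorize tasks using Eisenhower Matrix"""
--     def quadrant(task):
--         importance = task.get('importance', 'medium').lower()
--         urgency = task.get('urgency', 'medium').lower()
--         is_important = importance in ['high', 'important', 'yes']
--         is_urgent = urgency in ['high', 'urgent', 'yes']
--         if is_important: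
--             return 'urgent_important' if is_urgent else 'not_urgent_important'
--         return 'urgent_not_important' if is_urgent else 'not_urgent_not_important'
--
--     return {key: [t for t in tasks if quadrant(t) == key]
--             for key in ('urgent_important', 'not_urgent_important',
--                         'urgent_not_important', 'not_urgent_not_important')}
-- ===== Notes on version B (the rewrite author's own statement) =====
-- stated objective: idiomatic
-- what changed: Replaces the single pass that mutates four lists inside a dict through an if/elif chain with a quadrant-classifier function plus a dict comprehension that builds each quadrant as a filtered list of tasks.
import Mathlib
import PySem

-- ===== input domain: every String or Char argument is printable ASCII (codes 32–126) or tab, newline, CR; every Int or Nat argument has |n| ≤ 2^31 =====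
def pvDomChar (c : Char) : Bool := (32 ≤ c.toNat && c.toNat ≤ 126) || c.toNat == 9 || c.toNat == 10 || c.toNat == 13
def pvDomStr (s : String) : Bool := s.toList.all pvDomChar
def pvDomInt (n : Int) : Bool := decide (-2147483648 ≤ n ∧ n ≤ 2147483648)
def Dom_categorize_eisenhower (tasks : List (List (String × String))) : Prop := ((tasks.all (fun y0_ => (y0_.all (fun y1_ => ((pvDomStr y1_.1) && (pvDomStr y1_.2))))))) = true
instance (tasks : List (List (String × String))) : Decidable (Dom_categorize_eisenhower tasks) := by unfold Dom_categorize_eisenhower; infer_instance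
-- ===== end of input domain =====

-- B replaces A's single mutating loop with a quadrant-classifier function plus a per-quadrant filter comprehension (idiomatic; same cost).

-- ===== PORT A =====
-- the body of A's for-loop
def pvStep (m : PySem.Dict String (List (List (String × String)))) (task : List (String × String)) :
    PySem.Dict String (List (List (String × String))) :=
  let importance := PySem.Str.lower ((PySem.Dict.mk task).getD "importance" "medium")
  let urgency := PySem.Str.lower ((PySem.Dict.mk task).getD "urgency" "medium")
  let is_important := importance ∈ ["high", "important", "yes"]
  let is_urgent := urgency ∈ ["high", "urgent", "yes"]
  if is_important ∧ is_urgent then m.modify "urgent_important" [] (· ++ [task])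
  else if is_important then m.modify "not_urgent_important" [] (· ++ [task])
  else if is_urgent then m.modify "urgent_not_important" [] (· ++ [task])
  else m.modify "not_urgent_not_important" [] (· ++ [task])

def categorize_eisenhower (tasks : List (List (String × String))) : List (String × List (List (String × String))) :=
  let matrix : PySem.Dict String (List (List (String × String))) :=
    PySem.Dict.ofList [("urgent_important", []), ("not_urgent_important", []),
                       ("urgent_not_important", []), ("not_urgent_not_important", [])]
  (tasks.foldl pvStep matrix).items

-- ===== PORT B =====
def pvQuadrant (task : List (String × String)) : String :=
  let importance := PySem.Str.lower ((PySem.Dict.mk task).getD "importance" "medium")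
  let urgency := PySem.Str.lower ((PySem.Dict.mk task).getD "urgency" "medium")
  let is_important := importance ∈ ["high", "important", "yes"]
  let is_urgent := urgency ∈ ["high", "urgent", "yes"]
  if is_important then (if is_urgent then "urgent_important" else "not_urgent_important")
  else (if is_urgent then "urgent_not_important" else "not_urgent_not_important")

def categorize_eisenhower_alt (tasks : List (List (String × String))) : List (String × List (List (String × String))) :=
  ["urgent_important", "not_urgent_important", "urgent_not_important", "not_urgent_not_important"].map
    (fun key => (key, tasks.filter (fun t => pvQuadrant t == key)))

-- ===== PRECONDITION & SPEC =====
def Spec_categorize_eisenhower (tasks : List (List (String × String))) (out : List (String × List (List (String × String)))) : Prop := out = categorize_eisenhower_alt tasks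
instance (tasks : List (List (String × String))) (out : List (String × List (List (String × String)))) : Decidable (Spec_categorize_eisenhower tasks out) := by unfold Spec_categorize_eisenhower; infer_instance

-- ===== CLAIM (what is proved, stated in full; the proofs are below) =====
def Claim_equal_categorize_eisenhower : Prop := ∀ (tasks : List (List (String × String))), Dom_categorize_eisenhower tasks → Spec_categorize_eisenhower tasks (categorize_eisenhower tasks)

-- ===== LEMMAS AND PROOFS =====

theorem pv_step_ii (t : List (String × String)) (a b c d : List (List (String × String)))
    (hi : PySem.Str.lower ((PySem.Dict.mk t).getD "importance" "medium") ∈ ["high", "important", "yes"])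
    (hu : PySem.Str.lower ((PySem.Dict.mk t).getD "urgency" "medium") ∈ ["high", "urgent", "yes"]) :
    pvStep (PySem.Dict.mk [("urgent_important", a), ("not_urgent_important", b),
      ("urgent_not_important", c), ("not_urgent_not_important", d)]) t
    = PySem.Dict.mk [("urgent_important", a ++ [t]), ("not_urgent_important", b),
      ("urgent_not_important", c), ("not_urgent_not_important", d)] := by
  simp only [pvStep]
  rw [if_pos ⟨hi, hu⟩]
  simp [PySem.Dict.modify, PySem.Dict.getD, PySem.Dict.get?,
    PySem.Dict.contains, PySem.Dict.insert]

theorem pv_step_in (t : List (String × String)) (a b c d : List (List (String × String)))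
    (hi : PySem.Str.lower ((PySem.Dict.mk t).getD "importance" "medium") ∈ ["high", "important", "yes"])
    (hu : PySem.Str.lower ((PySem.Dict.mk t).getD "urgency" "medium") ∉ ["high", "urgent", "yes"]) :
    pvStep (PySem.Dict.mk [("urgent_important", a), ("not_urgent_important", b),
      ("urgent_not_important", c), ("not_urgent_not_important", d)]) t
    = PySem.Dict.mk [("urgent_important", a), ("not_urgent_important", b ++ [t]),
      ("urgent_not_important", c), ("not_urgent_not_important", d)] := by
  simp only [pvStep]
  rw [if_neg (fun h => hu h.2), if_pos hi]
  simp [PySem.Dict.modify, PySem.Dict.getD, PySem.Dict.get?,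
    PySem.Dict.contains, PySem.Dict.insert]

theorem pv_step_ni (t : List (String × String)) (a b c d : List (List (String × String)))
    (hi : PySem.Str.lower ((PySem.Dict.mk t).getD "importance" "medium") ∉ ["high", "important", "yes"])
    (hu : PySem.Str.lower ((PySem.Dict.mk t).getD "urgency" "medium") ∈ ["high", "urgent", "yes"]) :
    pvStep (PySem.Dict.mk [("urgent_important", a), ("not_urgent_important", b),
      ("urgent_not_important", c), ("not_urgent_not_important", d)]) t
    = PySem.Dict.mk [("urgent_important", a), ("not_urgent_important", b),
      ("urgent_not_important", c ++ [t]), ("not_urgent_not_important", d)] := by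
  simp only [pvStep]
  rw [if_neg (fun h => hi h.1), if_neg hi, if_pos hu]
  simp [PySem.Dict.modify, PySem.Dict.getD, PySem.Dict.get?,
    PySem.Dict.contains, PySem.Dict.insert]

theorem pv_step_nn (t : List (String × String)) (a b c d : List (List (String × String)))
    (hi : PySem.Str.lower ((PySem.Dict.mk t).getD "importance" "medium") ∉ ["high", "important", "yes"])
    (hu : PySem.Str.lower ((PySem.Dict.mk t).getD "urgency" "medium") ∉ ["high", "urgent", "yes"]) :
    pvStep (PySem.Dict.mk [("urgent_important", a), ("not_urgent_important", b),
      ("urgent_not_important", c), ("not_urgent_not_important", d)]) t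
    = PySem.Dict.mk [("urgent_important", a), ("not_urgent_important", b),
      ("urgent_not_important", c), ("not_urgent_not_important", d ++ [t])] := by
  simp only [pvStep]
  rw [if_neg (fun h => hi h.1), if_neg hi, if_neg hu]
  simp [PySem.Dict.modify, PySem.Dict.getD, PySem.Dict.get?,
    PySem.Dict.contains, PySem.Dict.insert]

-- loop invariant: A's fold from an arbitrary 4-key matrix appends each task to the quadrant
-- pvQuadrant selects, i.e. builds per-key filters.
theorem pv_inv (ts : List (List (String × String)))
    (a b c d : List (List (String × String))) :
    ((ts.foldl pvStep
      (PySem.Dict.mk [("urgent_important", a), ("not_urgent_important", b),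
                      ("urgent_not_important", c), ("not_urgent_not_important", d)])).items)
    = [("urgent_important", a ++ ts.filter (fun t => pvQuadrant t == "urgent_important")),
       ("not_urgent_important", b ++ ts.filter (fun t => pvQuadrant t == "not_urgent_important")),
       ("urgent_not_important", c ++ ts.filter (fun t => pvQuadrant t == "urgent_not_important")),
       ("not_urgent_not_important", d ++ ts.filter (fun t => pvQuadrant t == "not_urgent_not_important"))] := by
  induction ts generalizing a b c d with
  | nil => simp
  | cons t ts ih =>
    simp only [List.foldl_cons, List.filter_cons]
    by_cases hi : PySem.Str.lower ((PySem.Dict.mk t).getD "importance" "medium") ∈ ["high", "important", "yes"] <;>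
      by_cases hu : PySem.Str.lower ((PySem.Dict.mk t).getD "urgency" "medium") ∈ ["high", "urgent", "yes"]
    · rw [pv_step_ii t a b c d hi hu, ih]; simp [pvQuadrant, hi, hu]
    · rw [pv_step_in t a b c d hi hu, ih]; simp [pvQuadrant, hi, hu]
    · rw [pv_step_ni t a b c d hi hu, ih]; simp [pvQuadrant, hi, hu]
    · rw [pv_step_nn t a b c d hi hu, ih]; simp [pvQuadrant, hi, hu]

-- ===== VERDICT (by name: the statement is the Claim_ definition above) =====
theorem categorize_eisenhower_spec : Claim_equal_categorize_eisenhower := by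
  intro tasks _
  unfold Spec_categorize_eisenhower categorize_eisenhower categorize_eisenhower_alt
  rw [show (PySem.Dict.ofList [("urgent_important", []), ("not_urgent_important", []),
      ("urgent_not_important", []), ("not_urgent_not_important", [])] :
        PySem.Dict String (List (List (String × String))))
    = PySem.Dict.mk [("urgent_important", []), ("not_urgent_important", []),
      ("urgent_not_important", []), ("not_urgent_not_important", [])] from by rfl]
  rw [pv_inv]
  simp
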